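-- pv_equiv track=rewrite | github.com/safpla/t2t | deeplycurious/data/conll2003ner_dataio.py | read_corpus
-- ===== SOURCE A (Python) =====
-- def read_corpus(lines):
--     """
--     convert corpus into features and labels
--     """
--     features = list()
--     labels = list()
--     tmp_fl = list()
--     tmp_ll = list()
--     for line in lines:
--         if not (line.isspace() or (len(line) > 10 and line[0:10] == '-DOCSTART-')):
--             line = line.rstrip('\n').split()
--             tmp_fl.append(line[0])
--             tmp_ll.append(line[-1])
--         elif len(tmp_fl) > 0:
--             features.append(tmp_fl)
--             labels.append(tmp_ll)
--             tmp_fl = list()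
--             tmp_ll = list()
--     if len(tmp_fl) > 0:
--         features.append(tmp_fl)
--         labels.append(tmp_ll)
--
--     return features, labels
-- ===== SOURCE B (Python) =====
-- def _is_sep(line):
--     return line.isspace() or (len(line) > 10 and line[0:10] == '-DOCSTART-')
--
--
-- def read_corpus(lines):
--     """
--     convert corpus into features and labels
--     """
--     features = []
--     labels = []
--     i, n = 0, len(lines)
--     while i < n:
--         if _is_sep(lines[i]):
--             i += 1
--             continue
--         j = i
--         while j < n and not _is_sep(lines[j]):
--             j += 1
--         block = [line.rstrip('\n').split() for line in lines[i:j]]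
--         features.append([toks[0] for toks in block])
--         labels.append([toks[-1] for toks in block])
--         i = j
--     return features, labels
-- ===== Notes on version B (the rewrite author's own statement) =====
-- stated objective: alternative
-- what changed: B scans the list block-wise with two indices (skip separator lines, take a maximal run of content lines, map it to a features row and a labels row at once) instead of A's per-line accumulators tmp_fl/tmp_ll flushed at separators and again after the loop.
import Mathlib
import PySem

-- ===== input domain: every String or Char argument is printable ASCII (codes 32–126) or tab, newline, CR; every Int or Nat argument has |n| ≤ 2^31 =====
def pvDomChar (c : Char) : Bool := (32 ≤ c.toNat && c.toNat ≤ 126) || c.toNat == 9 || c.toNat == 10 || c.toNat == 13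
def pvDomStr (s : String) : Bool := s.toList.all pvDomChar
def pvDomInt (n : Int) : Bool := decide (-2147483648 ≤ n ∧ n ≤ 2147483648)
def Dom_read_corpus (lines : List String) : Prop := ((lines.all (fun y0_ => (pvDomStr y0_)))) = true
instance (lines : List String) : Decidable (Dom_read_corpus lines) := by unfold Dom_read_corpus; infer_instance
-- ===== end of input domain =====

-- B replaces A's per-line tmp_fl/tmp_ll accumulators (flushed at separators and after the
-- loop) by a block-wise two-index scan: skip separator lines, take a maximal run of content
-- lines, map the whole run to one features row and one labels row. Objective: alternative.

-- ===== PORT A =====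
-- separator test: line.isspace() or (len(line) > 10 and line[0:10] == '-DOCSTART-')
def pvSep (l : String) : Bool :=
  PySem.Str.strIsspace l ||
    (decide (10 < PySem.Str.len l) && (PySem.Str.slice l (some 0) (some 10) == "-DOCSTART-"))

-- line.rstrip('\n'): ported by hand (PySem has no rstrip-with-chars); exact — drops exactly
-- the trailing '\n' characters.
def pvRstripNl (s : String) : String :=
  String.ofList ((s.toList.reverse.dropWhile (fun c => c == '\n')).reverse)

-- line.rstrip('\n').split()
def pvToks (l : String) : List String := PySem.Str.split₀ (pvRstripNl l)

-- A's for-loop over lines with state (features, labels, tmp_fl, tmp_ll); the [] case is the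
-- trailing 'if len(tmp_fl) > 0' flush after the loop.
def pvLoopA (lines : List String) (features labels : List (List String))
    (tmp_fl tmp_ll : List String) : List (List String) × List (List String) :=
  match lines with
  | [] => if tmp_fl.length > 0 then (features ++ [tmp_fl], labels ++ [tmp_ll])
          else (features, labels)
  | line :: rest =>
    if !pvSep line then
      pvLoopA rest features labels
        (tmp_fl ++ [PySem.List.pyGetD (pvToks line) 0 ""])
        (tmp_ll ++ [PySem.List.pyGetD (pvToks line) (-1) ""])
    else if tmp_fl.length > 0 then
      pvLoopA rest (features ++ [tmp_fl]) (labels ++ [tmp_ll]) [] []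
    else
      pvLoopA rest features labels tmp_fl tmp_ll

def read_corpus (lines : List String) : List (List String) × List (List String) :=
  pvLoopA lines [] [] [] []

-- ===== PORT B =====
-- Source B's outer while-loop: skip a separator line, else take the maximal content run
-- lines[i:j], turn it into one features row and one labels row, continue after the run.
def pvAltGo (lines : List String) : List (List String) × List (List String) :=
  match lines with
  | [] => ([], [])
  | l :: ls =>
    if pvSep l then pvAltGo ls
    else
      let blk := (l :: ls.takeWhile (fun x => !pvSep x)).map pvToks
      let rest := pvAltGo (ls.dropWhile (fun x => !pvSep x))
      (blk.map (fun toks => PySem.List.pyGetD toks 0 "") :: rest.1,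
       blk.map (fun toks => PySem.List.pyGetD toks (-1) "") :: rest.2)
termination_by lines.length
decreasing_by
  all_goals have := List.length_dropWhile_le (p := fun x => !pvSep x) (l := ls)
  all_goals simp
  omega

def read_corpus_alt (lines : List String) : List (List String) × List (List String) :=
  pvAltGo lines

-- ===== PRECONDITION & SPEC =====
-- Pre_ excludes inputs containing the empty-string line '': it is not a separator and
-- splits to [], so Python A (and B alike) raises IndexError there.
def Pre_read_corpus (lines : List String) : Prop := "" ∉ lines
instance (lines : List String) : Decidable (Pre_read_corpus lines) := by
  unfold Pre_read_corpus; infer_instance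

def pvWitness_read_corpus : List String := ["Tok NNP B-ORG", "x y", " ", "a O"]

def Spec_read_corpus (lines : List String) (out : List (List String) × List (List String)) : Prop := out = read_corpus_alt lines
instance (lines : List String) (out : List (List String) × List (List String)) : Decidable (Spec_read_corpus lines out) := by unfold Spec_read_corpus; infer_instance

-- ===== CLAIM (what is proved, stated in full; the proofs are below) =====
def Claim_equal_read_corpus : Prop := ∀ (lines : List String), Dom_read_corpus lines → Pre_read_corpus lines → Spec_read_corpus lines (read_corpus lines)

-- ===== LEMMAS AND PROOFS =====

-- the features/labels accumulators only collect output: pull them out front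
theorem pvLoopA_acc (lines : List String) : ∀ (F L : List (List String)) (tf tl : List String),
    pvLoopA lines F L tf tl =
      (F ++ (pvLoopA lines [] [] tf tl).1, L ++ (pvLoopA lines [] [] tf tl).2) := by
  induction lines with
  | nil =>
    intro F L tf tl
    simp only [pvLoopA]
    split_ifs <;> simp
  | cons line rest ih =>
    intro F L tf tl
    simp only [pvLoopA]
    split_ifs with h1 h2
    · exact ih F L _ _
    · rw [ih (F ++ [tf]) (L ++ [tl]) [] []]
      simp only [List.nil_append]
      rw [ih [tf] [tl] [] []]
      simp
    · exact ih F L tf tl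

-- A's loop, started with empty output and a (possibly pending) synchronized block,
-- computes B's block-wise recursion.
theorem pvLoopA_eq_altGo (lines : List String) : ∀ (tf tl : List String), (tf = [] → tl = []) →
    pvLoopA lines [] [] tf tl =
      if tf = [] then pvAltGo lines
      else ((tf ++ (lines.takeWhile (fun x => !pvSep x)).map
                (fun l => PySem.List.pyGetD (pvToks l) 0 "")) ::
              (pvAltGo (lines.dropWhile (fun x => !pvSep x))).1,
            (tl ++ (lines.takeWhile (fun x => !pvSep x)).map
                (fun l => PySem.List.pyGetD (pvToks l) (-1) "")) ::
              (pvAltGo (lines.dropWhile (fun x => !pvSep x))).2) := by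
  induction lines with
  | nil =>
    intro tf tl hsync
    simp only [pvLoopA, pvAltGo]
    rcases eq_or_ne tf [] with h | h
    · simp [h]
    · simp [h, List.length_pos_iff.mpr h, pvAltGo]
  | cons l ls ih =>
    intro tf tl hsync
    by_cases hs : pvSep l = true
    · -- separator line
      simp only [pvLoopA, hs, Bool.not_true]
      rw [if_neg (by simp)]
      rcases eq_or_ne tf [] with h | h
      · have h2 := hsync h
        subst h; subst h2
        rw [if_neg (by simp), ih [] [] (fun _ => rfl), if_pos rfl, if_pos rfl]
        simp [pvAltGo, hs]
      · have h0 : tf.length > 0 := List.length_pos_iff.mpr h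
        rw [if_pos h0]
        simp only [List.nil_append]
        rw [pvLoopA_acc, ih [] [] (fun _ => rfl), if_pos rfl, if_neg h]
        simp [pvAltGo, hs]
    · -- content line
      have hns : (!pvSep l) = true := by simp [hs]
      simp only [pvLoopA, hns]
      rw [if_pos trivial]
      rw [ih (tf ++ [PySem.List.pyGetD (pvToks l) 0 ""])
             (tl ++ [PySem.List.pyGetD (pvToks l) (-1) ""]) (by simp)]
      rw [if_neg (by simp)]
      rcases eq_or_ne tf [] with h | h
      · have h2 := hsync h
        subst h; subst h2
        rw [if_pos rfl]
        simp only [pvAltGo, hs, Bool.false_eq_true, if_false, List.map_map, List.nil_append]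
        simp [Function.comp_def]
      · rw [if_neg h]
        simp [hns]

-- ===== VERDICT (by name: the statement is the Claim_ definition above) =====
theorem read_corpus_spec : Claim_equal_read_corpus := by
  intro lines _ _
  unfold Spec_read_corpus read_corpus read_corpus_alt
  rw [pvLoopA_eq_altGo lines [] [] (fun _ => rfl)]
  simp
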